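-- pv_equiv track=rewrite | github.com/zeanmio/SSE-Lab2 | api/app.py | extract_numbers_from_query
-- ===== SOURCE A (Python) =====
-- def extract_numbers_from_query(query):
--     query_words = query.split(" ")
--     numbers = []
--
--     for word in query_words:
--         cleaned_word = "".join(filter(str.isdigit, word))
--         if cleaned_word:
--             numbers.append(int(cleaned_word))
--
--     return numbers
-- ===== SOURCE B (Python) =====
-- def extract_numbers_from_query(query):
--     numbers = []
--     buf = []
--     for ch in query:
--         if ch == ' ':
--             if buf:
--                 numbers.append(int(''.join(buf)))
--                 buf = []
--         elif ch.isdigit():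
--             buf.append(ch)
--     if buf:
--         numbers.append(int(''.join(buf)))
--     return numbers
-- ===== Notes on version B (the rewrite author's own statement) =====
-- stated objective: alternative
-- what changed: Replaces split-then-per-word-filter-and-join with a single character-level pass that keeps a digit buffer and flushes it at each space and once at the end, never materialising the word list.
import Mathlib
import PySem

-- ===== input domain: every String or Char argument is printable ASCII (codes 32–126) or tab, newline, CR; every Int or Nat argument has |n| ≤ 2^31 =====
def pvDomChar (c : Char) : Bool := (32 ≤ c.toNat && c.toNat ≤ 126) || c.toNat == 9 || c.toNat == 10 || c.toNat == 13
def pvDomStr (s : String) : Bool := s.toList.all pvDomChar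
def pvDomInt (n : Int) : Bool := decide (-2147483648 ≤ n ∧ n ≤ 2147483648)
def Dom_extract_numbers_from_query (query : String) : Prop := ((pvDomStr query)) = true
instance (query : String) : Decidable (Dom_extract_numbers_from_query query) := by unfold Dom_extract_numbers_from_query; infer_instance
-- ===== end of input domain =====

-- B is a single character-level pass with a digit buffer instead of split-then-filter; return values proved equal.

-- ===== PORT A =====
def extract_numbers_from_query (query : String) : List Int :=
  let query_words := PySem.Chars.splitOn query.toList [' ']
  query_words.foldl (fun numbers word =>
    let cleaned_word := word.filter PySem.Chars.isdigit
    if cleaned_word ≠ [] then numbers ++ [(PySem.Int.ofChars? cleaned_word).getD 0]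
    else numbers) []

-- ===== PORT B =====
def extract_numbers_from_query_alt (query : String) : List Int :=
  let st := query.toList.foldl (fun (st : List Int × List Char) ch =>
    if ch = ' ' then
      if st.2.isEmpty then st else (st.1 ++ [(PySem.Int.ofChars? st.2).getD 0], [])
    else if PySem.Chars.isdigit ch then (st.1, st.2 ++ [ch])
    else st) ([], [])
  if st.2.isEmpty then st.1 else st.1 ++ [(PySem.Int.ofChars? st.2).getD 0]

-- ===== PRECONDITION & SPEC =====
def Spec_extract_numbers_from_query (query : String) (out : List Int) : Prop := out = extract_numbers_from_query_alt query
instance (query : String) (out : List Int) : Decidable (Spec_extract_numbers_from_query query out) := by unfold Spec_extract_numbers_from_query; infer_instance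

-- ===== CLAIM =====
def Claim_equal_extract_numbers_from_query : Prop := ∀ (query : String), Dom_extract_numbers_from_query query → Spec_extract_numbers_from_query query (extract_numbers_from_query query)

-- ===== LEMMAS AND PROOFS =====

-- a direct structural recursion computing split on a single space, for the proof
def pvSpl (buf : List Char) : List Char → List (List Char)
  | [] => [buf]
  | c :: rest => if c = ' ' then buf :: pvSpl [] rest else pvSpl (buf ++ [c]) rest

theorem pvSplitOn_go_eq : ∀ (fuel : Nat) (l cur : List Char) (acc : List (List Char)),
    l.length < fuel →
    PySem.Chars.splitOn.go [' '] fuel l cur acc = acc.reverse ++ pvSpl cur.reverse l := by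
  intro fuel
  induction fuel with
  | zero => intro l cur acc h; omega
  | succ n ih =>
    intro l cur acc h
    cases l with
    | nil => simp [PySem.Chars.splitOn.go, pvSpl]
    | cons c rest =>
      rw [PySem.Chars.splitOn.go]
      by_cases hc : c = ' '
      · subst hc
        simp only [List.isPrefixOf]
        rw [if_pos (by simp)]
        simp only [List.length_singleton, List.drop_succ_cons, List.drop_zero]
        rw [ih rest [] (cur.reverse :: acc) (by simpa using Nat.lt_of_succ_lt_succ h)]
        simp [pvSpl]
      · rw [if_neg (by simp [List.isPrefixOf_iff_prefix, List.cons_prefix_cons, Ne.symm hc])]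
        rw [ih rest (c :: cur) acc (by simpa using Nat.lt_of_succ_lt_succ h)]
        simp [pvSpl, hc]

theorem pvSplitOn_eq (l : List Char) :
    PySem.Chars.splitOn l [' '] = pvSpl [] l := by
  unfold PySem.Chars.splitOn
  rw [pvSplitOn_go_eq (l.length + 1) l [] [] (by omega)]
  simp

-- A's per-word step
def pvAstep (numbers : List Int) (word : List Char) : List Int :=
  let cleaned_word := word.filter PySem.Chars.isdigit
  if cleaned_word ≠ [] then numbers ++ [(PySem.Int.ofChars? cleaned_word).getD 0] else numbers

-- B's per-char step
def pvBstep (st : List Int × List Char) (ch : Char) : List Int × List Char :=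
  if ch = ' ' then
    if st.2.isEmpty then st else (st.1 ++ [(PySem.Int.ofChars? st.2).getD 0], [])
  else if PySem.Chars.isdigit ch then (st.1, st.2 ++ [ch])
  else st

def pvFlush (st : List Int × List Char) : List Int :=
  if st.2.isEmpty then st.1 else st.1 ++ [(PySem.Int.ofChars? st.2).getD 0]

theorem pvMain : ∀ (l p : List Char) (acc : List Int),
    pvFlush (l.foldl pvBstep (acc, p.filter PySem.Chars.isdigit)) =
      (pvSpl p l).foldl pvAstep acc := by
  intro l
  induction l with
  | nil =>
    intro p acc
    simp only [List.foldl_nil, pvSpl, pvFlush, pvAstep, List.foldl_cons]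
    by_cases h : p.filter PySem.Chars.isdigit = [] <;> simp [h, List.isEmpty_iff]
  | cons c rest ih =>
    intro p acc
    simp only [List.foldl_cons, pvSpl]
    by_cases hc : c = ' '
    · subst hc
      simp only [pvBstep, if_true]
      by_cases h : p.filter PySem.Chars.isdigit = []
      · rw [if_pos (by simp [h])]
        have := ih [] (pvAstep acc p)
        simp only [List.filter_nil] at this
        rw [h]
        simpa [pvAstep, h] using this
      · rw [if_neg (by simp [List.isEmpty_iff, h])]
        have := ih [] (pvAstep acc p)
        simp only [List.filter_nil] at this
        simpa [pvAstep, h] using this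
    · have hstep : pvBstep (acc, p.filter PySem.Chars.isdigit) c
          = (acc, (p ++ [c]).filter PySem.Chars.isdigit) := by
        by_cases hd : PySem.Chars.isdigit c <;> simp [pvBstep, hc, hd]
      rw [if_neg hc, hstep, ih (p ++ [c]) acc]

-- ===== VERDICT =====
theorem extract_numbers_from_query_spec : Claim_equal_extract_numbers_from_query := by
  intro query _
  unfold Spec_extract_numbers_from_query extract_numbers_from_query extract_numbers_from_query_alt
  show (PySem.Chars.splitOn query.toList [' ']).foldl pvAstep [] =
    pvFlush (query.toList.foldl pvBstep ([], []))
  rw [pvSplitOn_eq]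
  exact (pvMain query.toList [] []).symm
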